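-- pv_equiv track=rewrite | github.com/pnpninja/100daysofcode | src/main/java/edu/stonybrook/pnarendra/solutions/Hackerrank_MaxBalancedTeams.py | maxBalancedTeams
-- ===== SOURCE A (Python) =====
-- def maxBalancedTeams(developers, maxNewHires):
--     # Write your code here
--     developers.sort()
--     prefixSum = [0]*(len(developers) + 1)
--     # prefixSum[1] = developers[0]
--
--     for i in range(len(prefixSum)-1):
--         prefixSum[i + 1] = prefixSum[i] + developers[i]
--
--     maxi = len(developers)
--     mini, ans = 1,1
--     while (mini <= maxi):
--         mid = (maxi + mini) // 2
--         if (check(prefixSum, mid, maxNewHires, developers)):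
--             ans = mid
--             mini = mid+1
--         else :
--             maxi = mid - 1
--     return ans
--
-- def check(pSum, length, maxHire, dev):
--     i,j=0,length
--     while(j<=len(dev)):
--         maxSize = dev[j-1]
--         totalMembers = maxSize*length
--         currMembers = pSum[j]-pSum[i]
--         if(currMembers+maxHire>=totalMembers):
--             return True
--         else:
--             i+=1
--             j+=1
--     return False
-- ===== SOURCE B (Python) =====
-- def maxBalancedTeams(developers, maxNewHires):
--     # Sliding window over the sorted list: like A, sorts `developers` in place.
--     developers.sort()
--     best = 1
--     windowSum = 0
--     left = 0
--     for right in range(len(developers)):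
--         windowSum += developers[right]
--         while left <= right and developers[right] * (right - left + 1) - windowSum > maxNewHires:
--             windowSum -= developers[left]
--             left += 1
--         best = max(best, right - left + 1)
--     return best
-- ===== Notes on version B (the rewrite author's own statement) =====
-- stated objective: faster
-- what changed: Replaces the prefix-sum array, binary search over team size and the separate window-check helper by a single sliding-window pass over the sorted list.
import Mathlib
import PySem

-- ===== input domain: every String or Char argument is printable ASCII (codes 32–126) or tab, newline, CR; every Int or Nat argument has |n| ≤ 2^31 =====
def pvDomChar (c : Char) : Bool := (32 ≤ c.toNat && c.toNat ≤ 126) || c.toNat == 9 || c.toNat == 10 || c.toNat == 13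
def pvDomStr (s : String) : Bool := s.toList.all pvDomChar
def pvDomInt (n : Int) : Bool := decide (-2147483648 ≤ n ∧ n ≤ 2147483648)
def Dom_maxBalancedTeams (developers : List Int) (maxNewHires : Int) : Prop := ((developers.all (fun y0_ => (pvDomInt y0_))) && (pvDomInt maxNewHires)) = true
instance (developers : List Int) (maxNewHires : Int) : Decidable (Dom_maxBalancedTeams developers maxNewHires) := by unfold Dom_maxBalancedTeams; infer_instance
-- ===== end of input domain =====

-- B replaces A's prefix-sum array + binary search + check helper by one sliding-window pass
-- over the sorted list (measurably faster); both A and B sort `developers` in place, and the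
-- equivalence proved here is about the return value.
-- ===== PORT A =====
-- checkLoop: the while loop of Python helper `check` (fuel = remaining iterations bound).
def checkLoop (pSum dev : List Int) (len_ maxHire : Int) : Int → Int → Nat → Bool
  | _, _, 0 => false
  | i, j, fuel+1 =>
    if j ≤ (dev.length : Int) then
      let maxSize := PySem.List.pyGetD dev (j-1) 0
      let totalMembers := maxSize * len_
      let currMembers := PySem.List.pyGetD pSum j 0 - PySem.List.pyGetD pSum i 0
      if currMembers + maxHire ≥ totalMembers then true
      else checkLoop pSum dev len_ maxHire (i+1) (j+1) fuel
    else false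

def check (pSum : List Int) (len_ : Int) (maxHire : Int) (dev : List Int) : Bool :=
  checkLoop pSum dev len_ maxHire 0 len_ (dev.length + 1)

-- the prefixSum-building for loop: prefixA dev acc produces [acc, acc+d0, acc+d0+d1, ...]
def prefixA : List Int → Int → List Int
  | [], acc => [acc]
  | d :: ds, acc => acc :: prefixA ds (acc + d)

-- the binary-search while loop (fuel = remaining iterations bound)
def bsLoop (pSum dev : List Int) (maxHire : Int) : Int → Int → Int → Nat → Int
  | _, _, ans, 0 => ans
  | mini, maxi, ans, fuel+1 =>
    if mini ≤ maxi then
      let mid := PySem.Int.floordiv (maxi + mini) 2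
      if check pSum mid maxHire dev then bsLoop pSum dev maxHire (mid+1) maxi mid fuel
      else bsLoop pSum dev maxHire mini (mid-1) ans fuel
    else ans

def maxBalancedTeams (developers : List Int) (maxNewHires : Int) : Int :=
  let dev := PySem.List.sorted developers (fun x => x) false
  let prefixSum := prefixA dev 0
  bsLoop prefixSum dev maxNewHires 1 (dev.length : Int) 1 (dev.length + 1)

-- ===== PORT B =====
-- the inner shrink while loop of Source B (fuel = remaining iterations bound); returns (windowSum, left)
def shrinkLoop (dev : List Int) (r maxHire : Int) : Int → Int → Nat → Int × Int
  | wsum, left, 0 => (wsum, left)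
  | wsum, left, fuel+1 =>
    if left ≤ r ∧ PySem.List.pyGetD dev r 0 * (r - left + 1) - wsum > maxHire then
      shrinkLoop dev r maxHire (wsum - PySem.List.pyGetD dev left 0) (left+1) fuel
    else (wsum, left)

-- state = (best, windowSum, left)
def altStep (dev : List Int) (maxHire : Int) (st : Int × Int × Int) (r : Int) : Int × Int × Int :=
  let (best, wsum, left) := st
  let wsum := wsum + PySem.List.pyGetD dev r 0
  let (wsum, left) := shrinkLoop dev r maxHire wsum left (dev.length + 1)
  (max best (r - left + 1), wsum, left)

def maxBalancedTeams_alt (developers : List Int) (maxNewHires : Int) : Int :=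
  let dev := PySem.List.sorted developers (fun x => x) false
  ((PySem.List.pyRange 0 (dev.length : Int) 1).foldl (altStep dev maxNewHires) (1, 0, 0)).1

-- ===== PRECONDITION & SPEC =====
def Spec_maxBalancedTeams (developers : List Int) (maxNewHires : Int) (out : Int) : Prop := out = maxBalancedTeams_alt developers maxNewHires
instance (developers : List Int) (maxNewHires : Int) (out : Int) : Decidable (Spec_maxBalancedTeams developers maxNewHires out) := by unfold Spec_maxBalancedTeams; infer_instance

-- ===== CLAIM (what is proved, stated in full; the proofs are below) =====
def Claim_equal_maxBalancedTeams : Prop := ∀ (developers : List Int) (maxNewHires : Int), Dom_maxBalancedTeams developers maxNewHires → Spec_maxBalancedTeams developers maxNewHires (maxBalancedTeams developers maxNewHires)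

-- ===== LEMMAS AND PROOFS =====

-- ---- spec-side notions (proof only) ----
def prefN (s : List Int) (k : Nat) : Int := (s.take k).sum
def costN (s : List Int) (l r : Nat) : Int :=
  s.getD r 0 * ((r : Int) - l + 1) - (prefN s (r+1) - prefN s l)
-- a balanced window of size L = r+1-l inside s within budget H
def Win (s : List Int) (H L : Int) (l r : Nat) : Prop :=
  r < s.length ∧ l ≤ r ∧ ((r : Int) + 1 - l = L) ∧ costN s l r ≤ H
def Feas (s : List Int) (H L : Int) : Prop := ∃ l r, Win s H L l r
-- the characterisation both programs satisfy
def Pgoal (s : List Int) (H m : Int) : Prop :=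
  1 ≤ m ∧ (m = 1 ∨ Feas s H m) ∧ ∀ L, Feas s H L → L ≤ m

lemma Pgoal_unique {s : List Int} {H m m' : Int} (h : Pgoal s H m) (h' : Pgoal s H m') : m = m' := by
  obtain ⟨h1, h2, h3⟩ := h
  obtain ⟨h1', h2', h3'⟩ := h'
  have hle : m ≤ m' := by
    rcases h2 with rfl | hf
    · omega
    · exact h3' _ hf
  have hle' : m' ≤ m := by
    rcases h2' with rfl | hf
    · omega
    · exact h3 _ hf
  omega

lemma prefN_succ {s : List Int} {k : Nat} (h : k < s.length) :
    prefN s (k+1) = prefN s k + s.getD k 0 := by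
  unfold prefN
  rw [List.take_add_one, List.getElem?_eq_getElem h, List.sum_append,
    List.getD_eq_getElem s 0 h]
  simp

lemma Feas_le_length {s : List Int} {H L : Int} (h : Feas s H L) :
    1 ≤ L ∧ L ≤ (s.length : Int) := by
  obtain ⟨l, r, hr, hl, hL, _⟩ := h
  omega

lemma sorted_getD_le {s : List Int} (hs : s.Pairwise (· ≤ ·)) {a b : Nat}
    (hab : a < b) (hb : b < s.length) : s.getD a 0 ≤ s.getD b 0 := by
  have ha : a < s.length := lt_trans hab hb
  rw [List.getD_eq_getElem s 0 ha, List.getD_eq_getElem s 0 hb]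
  exact List.pairwise_iff_getElem.mp hs a b ha hb hab

-- cost is monotone in the right end (fixed left end), on a sorted list
lemma costN_mono_r {s : List Int} (hs : s.Pairwise (· ≤ ·)) {m r : Nat}
    (hm : m ≤ r) (hr1 : 1 ≤ r) (hr : r < s.length) :
    costN s m (r-1) ≤ costN s m r := by
  have hr1' : r - 1 < s.length := by omega
  have hg : s.getD (r-1) 0 ≤ s.getD r 0 := sorted_getD_le hs (by omega) hr
  have e1 : prefN s (r-1+1) = prefN s (r-1) + s.getD (r-1) 0 := prefN_succ hr1'
  have e2 : prefN s (r+1) = prefN s r + s.getD r 0 := prefN_succ hr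
  have er : r - 1 + 1 = r := by omega
  rw [er] at e1
  have hc : ((r-1 : Nat) : Int) = (r : Int) - 1 := by omega
  have h0 : 0 ≤ (s.getD r 0 - s.getD (r-1) 0) * ((r : Int) - m) :=
    mul_nonneg (by omega) (by omega)
  unfold costN
  rw [hc, er, e1, e2]
  nlinarith [h0]

-- shrinking a window from the left keeps it within budget, on a sorted list
lemma Win_shrink {s : List Int} (hs : s.Pairwise (· ≤ ·)) {H L : Int} {l r : Nat}
    (h : Win s H L l r) (h2 : 2 ≤ L) : Win s H (L-1) (l+1) r := by
  obtain ⟨hr, hl, hL, hc⟩ := h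
  have hlr : l < r := by omega
  have hg : s.getD l 0 ≤ s.getD r 0 := sorted_getD_le hs hlr hr
  have hlN : l < s.length := lt_trans hlr hr
  have e : prefN s (l+1) = prefN s l + s.getD l 0 := prefN_succ hlN
  refine ⟨hr, by omega, by push_cast; omega, ?_⟩
  unfold costN at hc ⊢
  rw [e]
  push_cast
  nlinarith [hg, hc]

lemma Feas_mono {s : List Int} (hs : s.Pairwise (· ≤ ·)) {H L L' : Int}
    (h : Feas s H L) (h1 : 1 ≤ L') (h2 : L' ≤ L) : Feas s H L' := by
  have key : ∀ k : Nat, 1 ≤ L - k → Feas s H (L - k) := by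
    intro k
    induction k with
    | zero => intro _; simpa using h
    | succ k ih =>
      intro hk
      have hfk : Feas s H (L - k) := ih (by push_cast at hk ⊢; omega)
      obtain ⟨l, r, hw⟩ := hfk
      have h2' : 2 ≤ L - (k : Int) := by push_cast at hk ⊢; omega
      have hW := Win_shrink hs hw h2'
      have e : L - ((k+1 : Nat) : Int) = L - (k : Int) - 1 := by push_cast; ring
      rw [e]
      exact ⟨l+1, r, hW⟩
  have := key (L - L').toNat (by omega)
  have e : L - ((L - L').toNat : Int) = L' := by omega
  rwa [e] at this

-- ---- port A: prefix sums ----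
lemma prefixA_getD (s : List Int) (acc : Int) (k : Nat) (hk : k ≤ s.length) :
    (prefixA s acc).getD k 0 = acc + prefN s k := by
  induction s generalizing acc k with
  | nil =>
    have : k = 0 := by simpa using hk
    simp [this, prefixA, prefN]
  | cons d ds ih =>
    cases k with
    | zero => simp [prefixA, prefN]
    | succ k =>
      have hk' : k ≤ ds.length := by simpa using hk
      simp only [prefixA, List.getD_cons_succ, ih (acc + d) k hk']
      simp [prefN, List.take_succ_cons]
      ring

lemma prefixA_pyGetD (s : List Int) (j : Int) (h0 : 0 ≤ j) (hn : j ≤ (s.length : Int)) :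
    PySem.List.pyGetD (prefixA s 0) j 0 = prefN s j.toNat := by
  have hj : j = (j.toNat : Int) := by omega
  rw [hj, PySem.List.pyGetD_natCast]
  rw [prefixA_getD s 0 j.toNat (by omega)]
  have e : ((j.toNat : Int)).toNat = j.toNat := by omega
  rw [e]
  ring

-- ---- port A: the check loop ----
lemma checkLoop_spec (s : List Int) (H L : Int) (hL : 1 ≤ L) :
    ∀ (fuel : Nat) (j : Int), 0 ≤ j - L → (s.length : Int) - j < (fuel : Int) →
    (checkLoop (prefixA s 0) s L H (j - L) j fuel = true ↔
      ∃ (l r : Nat), j ≤ (r : Int) + 1 ∧ Win s H L l r) := by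
  intro fuel
  induction fuel with
  | zero =>
    intro j h0 hfu
    simp only [checkLoop, Nat.cast_zero] at *
    constructor
    · intro h; exact absurd h (by simp)
    · rintro ⟨l, r, hjr, hr, _⟩
      exfalso; omega
  | succ fuel ih =>
    intro j h0 hfu
    have hj1 : 1 ≤ j := by omega
    simp only [checkLoop]
    by_cases hjn : j ≤ (s.length : Int)
    · rw [if_pos hjn]
      set r0 : Nat := (j-1).toNat with hr0
      set l0 : Nat := (j-L).toNat with hl0
      have ej1 : j - 1 = (r0 : Int) := by omega
      have ejL : j - L = (l0 : Int) := by omega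
      have hr0n : r0 < s.length := by omega
      have hl0r0 : l0 ≤ r0 := by omega
      have eL : (r0 : Int) + 1 - l0 = L := by omega
      have eg : PySem.List.pyGetD s (j - 1) 0 = s.getD r0 0 := by
        rw [ej1, PySem.List.pyGetD_natCast]
      have ep1 : PySem.List.pyGetD (prefixA s 0) j 0 = prefN s (r0 + 1) := by
        rw [prefixA_pyGetD s j (by omega) hjn]
        have : j.toNat = r0 + 1 := by omega
        rw [this]
      have ep2 : PySem.List.pyGetD (prefixA s 0) (j - L) 0 = prefN s l0 := by
        rw [prefixA_pyGetD s (j - L) (by omega) (by omega)]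
      rw [eg, ep1, ep2]
      have ecost : costN s l0 r0 = s.getD r0 0 * L - (prefN s (r0+1) - prefN s l0) := by
        unfold costN
        have e2 : ((r0 : Int) - l0 + 1) = L := by omega
        rw [e2]
      by_cases hc : prefN s (r0+1) - prefN s l0 + H ≥ s.getD r0 0 * L
      · rw [if_pos hc]
        simp only [true_iff]
        exact ⟨l0, r0, by omega, hr0n, hl0r0, eL, by omega⟩
      · rw [if_neg hc]
        have estep : j - L + 1 = (j + 1) - L := by ring
        rw [estep, ih (j+1) (by omega) (by push_cast at hfu ⊢; omega)]
        constructor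
        · rintro ⟨l, r, hjr, hw⟩
          exact ⟨l, r, by omega, hw⟩
        · rintro ⟨l, r, hjr, hw⟩
          rcases lt_or_ge (j : Int) ((r : Int) + 1) with hlt | hge
          · exact ⟨l, r, by omega, hw⟩
          · exfalso
            obtain ⟨hr, hlr, hLw, hcw⟩ := hw
            have er : r = r0 := by omega
            have el : l = l0 := by omega
            rw [er, el] at hcw
            omega
    · rw [if_neg hjn]
      constructor
      · intro h; exact absurd h (by simp)
      · rintro ⟨l, r, hjr, hr, _⟩
        exfalso; omega

lemma check_spec (s : List Int) (H L : Int) (hL : 1 ≤ L) :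
    (check (prefixA s 0) L H s = true ↔ Feas s H L) := by
  unfold check
  have h := checkLoop_spec s H L hL (s.length + 1) L (by omega) (by push_cast; omega)
  rw [show L - L = (0 : Int) by ring] at h
  rw [h]
  constructor
  · rintro ⟨l, r, _, hw⟩; exact ⟨l, r, hw⟩
  · rintro ⟨l, r, hw⟩
    refine ⟨l, r, ?_, hw⟩
    obtain ⟨hr, hlr, hLw, _⟩ := hw
    omega

-- ---- port A: the binary-search loop ----
lemma bsLoop_done (s : List Int) (H mini maxi ans : Int) (fuel : Nat)
    (hterm : maxi < mini) (hm : 1 ≤ mini) (hmm : mini ≤ maxi + 1)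
    (hans : ans = max 1 (mini - 1))
    (hfe : 2 ≤ mini → Feas s H (mini - 1))
    (hnf : ∀ L, maxi < L → ¬ Feas s H L) :
    Pgoal s H (bsLoop (prefixA s 0) s H mini maxi ans fuel) := by
  have hret : bsLoop (prefixA s 0) s H mini maxi ans fuel = ans := by
    cases fuel with
    | zero => simp [bsLoop]
    | succ fuel => simp only [bsLoop]; rw [if_neg (by omega)]
  rw [hret]
  refine ⟨by omega, ?_, ?_⟩
  · by_cases h2 : 2 ≤ mini
    · right
      have : ans = mini - 1 := by omega
      rw [this]
      exact hfe h2
    · left; omega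
  · intro L hF
    by_contra hgt
    have h1L := Feas_le_length hF
    exact hnf L (by omega) hF

lemma bsLoop_spec (s : List Int) (hs : s.Pairwise (· ≤ ·)) (H : Int) :
    ∀ (fuel : Nat) (mini maxi ans : Int),
    1 ≤ mini → mini ≤ maxi + 1 → maxi ≤ (s.length : Int) → maxi - mini < (fuel : Int) →
    ans = max 1 (mini - 1) →
    (2 ≤ mini → Feas s H (mini - 1)) →
    (∀ L, maxi < L → ¬ Feas s H L) →
    Pgoal s H (bsLoop (prefixA s 0) s H mini maxi ans fuel) := by
  intro fuel
  induction fuel with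
  | zero =>
    intro mini maxi ans h1 h2 h3 h4 h5 h6 h7
    exact bsLoop_done s H mini maxi ans 0 (by push_cast at h4; omega) h1 h2 h5 h6 h7
  | succ fuel ih =>
    intro mini maxi ans h1 h2 h3 h4 h5 h6 h7
    by_cases hterm : mini ≤ maxi
    · simp only [bsLoop]
      rw [if_pos hterm]
      have hmid : mini ≤ PySem.Int.floordiv (maxi + mini) 2 ∧
          PySem.Int.floordiv (maxi + mini) 2 ≤ maxi := by
        rw [add_comm]
        exact PySem.Int.floordiv_two_mid_bounds hterm
      set mid := PySem.Int.floordiv (maxi + mini) 2 with hmiddef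
      have hmid1 : 1 ≤ mid := by omega
      by_cases hc : check (prefixA s 0) mid H s = true
      · rw [if_pos hc]
        refine ih (mid+1) maxi mid (by omega) (by omega) h3 (by push_cast at h4 ⊢; omega)
          (by omega) (fun _ => ?_) h7
        have : mid + 1 - 1 = mid := by ring
        rw [this]
        exact (check_spec s H mid hmid1).mp hc
      · rw [if_neg hc]
        refine ih mini (mid-1) ans h1 (by omega) (by omega) (by push_cast at h4 ⊢; omega)
          h5 h6 ?_
        intro L hL hF
        by_cases hLmaxi : maxi < L
        · exact h7 L hLmaxi hF
        · have h1L := Feas_le_length hF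
          have : Feas s H mid := Feas_mono hs hF hmid1 (by omega)
          exact hc ((check_spec s H mid hmid1).mpr this)
    · exact bsLoop_done s H mini maxi ans _ (by omega) h1 h2 h5 h6 h7

lemma portA_Pgoal (developers : List Int) (H : Int) :
    Pgoal (PySem.List.sorted developers (fun x => x) false) H (maxBalancedTeams developers H) := by
  set s := PySem.List.sorted developers (fun x => x) false with hsdef
  have hs : s.Pairwise (· ≤ ·) := PySem.List.sorted_pairwise developers (fun x => x)
  show Pgoal s H (bsLoop (prefixA s 0) s H 1 (s.length : Int) 1 (s.length + 1))
  refine bsLoop_spec s hs H (s.length + 1) 1 (s.length : Int) 1 (by omega) (by omega)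
    (by omega) (by push_cast; omega) (by omega) (by omega) ?_
  intro L hL hF
  have := Feas_le_length hF
  omega

-- ---- port B: the shrink loop ----
lemma shrink_spec (s : List Int) (H : Int) (r : Nat) (hr : r < s.length) :
    ∀ (fuel : Nat) (l : Nat), l ≤ r + 1 → (r + 1 - l) < fuel →
    ∃ l' : Nat, l ≤ l' ∧ l' ≤ r + 1 ∧
      shrinkLoop s (r : Int) H (prefN s (r+1) - prefN s l) (l : Int) fuel
        = (prefN s (r+1) - prefN s l', (l' : Int)) ∧
      (l' ≤ r → costN s l' r ≤ H) ∧ (∀ m, l ≤ m → m < l' → H < costN s m r) := by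
  intro fuel
  induction fuel with
  | zero => intro l hl hfu; omega
  | succ fuel ih =>
    intro l hl hfu
    simp only [shrinkLoop, PySem.List.pyGetD_natCast]
    by_cases hg : l ≤ r ∧ H < costN s l r
    · rw [if_pos (by
        refine ⟨by exact_mod_cast Int.ofNat_le.mpr hg.1, ?_⟩
        have h2 := hg.2
        unfold costN at h2
        simp only [List.getD_eq_getElem?_getD] at h2 ⊢
        omega)]
      have hlN : l < s.length := lt_of_le_of_lt hg.1 hr
      have ew : prefN s (r+1) - prefN s l - s.getD l 0 = prefN s (r+1) - prefN s (l+1) := by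
        rw [prefN_succ hlN]; ring
      have ec : (l : Int) + 1 = ((l+1 : Nat) : Int) := by push_cast; ring
      rw [show s.getD l 0 = (s.getD l 0 : Int) from rfl] at ew
      rw [ew, ec]
      obtain ⟨l', h1, h2, h3, h4, h5⟩ := ih (l+1) (by omega) (by omega)
      refine ⟨l', by omega, h2, h3, h4, ?_⟩
      intro m hm1 hm2
      rcases Nat.eq_or_lt_of_le hm1 with rfl | hlt
      · exact hg.2
      · exact h5 m (by omega) hm2
    · rw [if_neg (by
        intro hcon
        apply hg
        constructor
        · exact_mod_cast hcon.1
        · have h2 := hcon.2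
          unfold costN
          simp only [List.getD_eq_getElem?_getD] at h2 ⊢
          omega)]
      exact ⟨l, le_refl l, hl, rfl, fun hlr => by
        by_contra hcc
        exact hg ⟨hlr, by omega⟩, fun m hm1 hm2 => absurd hm2 (by omega)⟩

-- invariant of the outer fold of port B, before processing index r
def InvB (s : List Int) (H : Int) (r : Nat) (best wsum : Int) (leftN : Nat) : Prop :=
  leftN ≤ r ∧ wsum = prefN s r - prefN s leftN ∧ 1 ≤ best ∧ (best = 1 ∨ Feas s H best) ∧
  (∀ m, m < leftN → H < costN s m (r-1)) ∧
  (∀ L l' r', Win s H L l' r' → r' < r → L ≤ best)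

lemma altFold_inv (s : List Int) (hs : s.Pairwise (· ≤ ·)) (H : Int) :
    ∀ (r : Nat), r ≤ s.length →
    ∃ (best wsum : Int) (leftN : Nat),
      ((List.range r).map (fun k : Nat => (k : Int))).foldl (altStep s H) (1, 0, 0) = (best, wsum, (leftN : Int)) ∧
      InvB s H r best wsum leftN := by
  intro r
  induction r with
  | zero =>
    intro _
    refine ⟨1, 0, 0, by simp, ?_⟩
    refine ⟨le_refl 0, by simp, by omega, Or.inl rfl, ?_, ?_⟩
    · intro m hm; omega
    · intro L l' r' _ h; omega
  | succ r ih =>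
    intro hr1
    have hrn : r < s.length := by omega
    obtain ⟨best, wsum, leftN, heq, hinv⟩ := ih (by omega)
    obtain ⟨hleft, hwsum, hbest1, hbestF, hexcl0, hmax0⟩ := hinv
    rw [List.range_succ, List.map_append, List.foldl_append, heq]
    simp only [List.map_cons, List.map_nil, List.foldl_cons, List.foldl_nil, altStep,
      PySem.List.pyGetD_natCast]
    have ew : wsum + s.getD r 0 = prefN s (r+1) - prefN s leftN := by
      rw [hwsum, prefN_succ hrn]; ring
    rw [show wsum + (s.getD r 0 : Int) = prefN s (r+1) - prefN s leftN from ew]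
    obtain ⟨l', hll', hl'r1, heq2, hcost, hexcl⟩ :=
      shrink_spec s H r hrn (s.length + 1) leftN (by omega) (by omega)
    rw [heq2]
    -- combined exclusion at round r
    have hexclAll : ∀ m, m < l' → H < costN s m r := by
      intro m hm
      by_cases hm2 : leftN ≤ m
      · exact hexcl m hm2 hm
      · have hold : H < costN s m (r-1) := hexcl0 m (by omega)
        have := costN_mono_r hs (m := m) (r := r) (by omega) (by omega) hrn
        omega
    refine ⟨max best ((r : Int) - l' + 1), prefN s (r+1) - prefN s l', l', rfl, ?_, rfl, ?_, ?_, ?_, ?_⟩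
    · omega
    · omega
    · by_cases hbig : (r : Int) - l' + 1 ≤ best
      · rw [max_eq_left hbig]; exact hbestF
      · right
        rw [max_eq_right (by omega)]
        have hl'r : l' ≤ r := by omega
        refine ⟨l', r, hrn, hl'r, by omega, ?_⟩
        have hc := hcost hl'r
        unfold costN at hc ⊢
        omega
    · intro m hm
      have : r + 1 - 1 = r := by omega
      rw [this]
      exact hexclAll m hm
    · intro L l2 r2 hw hr2
      obtain ⟨hr2n, hl2r2, hLsz, hc2⟩ := hw
      by_cases hcase : r2 < r
      · have := hmax0 L l2 r2 ⟨hr2n, hl2r2, hLsz, hc2⟩ hcase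
        omega
      · have hr2r : r2 = r := by omega
        subst hr2r
        have hl2l' : l' ≤ l2 := by
          by_contra hcc
          have := hexclAll l2 (by omega)
          omega
        have : L ≤ (r2 : Int) - l' + 1 := by omega
        omega

lemma portB_Pgoal (developers : List Int) (H : Int) :
    Pgoal (PySem.List.sorted developers (fun x => x) false) H (maxBalancedTeams_alt developers H) := by
  set s := PySem.List.sorted developers (fun x => x) false with hsdef
  have hs : s.Pairwise (· ≤ ·) := PySem.List.sorted_pairwise developers (fun x => x)
  show Pgoal s H (((PySem.List.pyRange 0 (s.length : Int) 1).foldl (altStep s H) (1, 0, 0)).1)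
  rw [PySem.List.pyRange_zero_nat]
  obtain ⟨best, wsum, leftN, heq, hinv⟩ := altFold_inv s hs H s.length (le_refl _)
  rw [heq]
  obtain ⟨_, _, hbest1, hbestF, _, hmax⟩ := hinv
  refine ⟨hbest1, hbestF, ?_⟩
  rintro L ⟨l, r, hw⟩
  exact hmax L l r hw hw.1

-- ===== VERDICT (by name: the statement is the Claim_ definition above) =====
theorem maxBalancedTeams_spec : Claim_equal_maxBalancedTeams := by
  intro developers maxNewHires _
  unfold Spec_maxBalancedTeams
  exact Pgoal_unique (portA_Pgoal developers maxNewHires) (portB_Pgoal developers maxNewHires)
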